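-- pv_equiv track=rewrite | github.com/IgorLucindo/academic-homeworks-projects | homeworks/operations-research/HW4/classes/TicTacToe.py | _get_symmetries
-- ===== SOURCE A (Python) =====
-- def _get_symmetries(b):
--     """
--     Returns all 8 symmetries of a 3x3 board (rotations and reflections)
--     """
--     def rotate(b): return (b[6], b[3], b[0], b[7], b[4], b[1], b[8], b[5], b[2])
--     def reflect(b): return (b[2], b[1], b[0], b[5], b[4], b[3], b[8], b[7], b[6])
--
--     boards = []
--     current = b
--     for _ in range(4):
--         boards.append(current)
--         boards.append(reflect(current))
--         current = rotate(current)
--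
--     return boards
-- ===== SOURCE B (Python) =====
-- _PERMS = (
--     (2, 1, 0, 5, 4, 3, 8, 7, 6),  # reflect
--     (6, 3, 0, 7, 4, 1, 8, 5, 2),  # rotate
--     (0, 3, 6, 1, 4, 7, 2, 5, 8),  # reflect . rotate
--     (8, 7, 6, 5, 4, 3, 2, 1, 0),  # rotate^2
--     (6, 7, 8, 3, 4, 5, 0, 1, 2),  # reflect . rotate^2
--     (2, 5, 8, 1, 4, 7, 0, 3, 6),  # rotate^3
--     (8, 5, 2, 7, 4, 1, 6, 3, 0),  # reflect . rotate^3
-- )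
--
-- def _get_symmetries(b):
--     """
--     Returns all 8 symmetries of a 3x3 board (rotations and reflections)
--     """
--     return [b] + [tuple(b[i] for i in p) for p in _PERMS]
-- ===== Notes on version B (the rewrite author's own statement) =====
-- stated objective: idiomatic
-- what changed: Replaces the mutable-current loop composing rotate/reflect step by step with eight precomputed index-permutation tuples applied in one comprehension (boards[0] stays the original object).
import Mathlib
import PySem

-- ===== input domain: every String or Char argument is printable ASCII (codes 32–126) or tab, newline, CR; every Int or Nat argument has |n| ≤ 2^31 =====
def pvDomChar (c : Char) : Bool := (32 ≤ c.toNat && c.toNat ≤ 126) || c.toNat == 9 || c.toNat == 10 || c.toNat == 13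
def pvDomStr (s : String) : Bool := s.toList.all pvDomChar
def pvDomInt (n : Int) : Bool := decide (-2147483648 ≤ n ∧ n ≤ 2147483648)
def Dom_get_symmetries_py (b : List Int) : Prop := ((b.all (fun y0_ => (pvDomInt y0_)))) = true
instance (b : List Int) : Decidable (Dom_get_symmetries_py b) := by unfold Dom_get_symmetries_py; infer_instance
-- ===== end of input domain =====

-- B replaces the mutable-current rotate/reflect loop with eight precomputed index permutations (idiomatic).


-- ===== PORT A =====
-- b[i] for a nonnegative literal i; Python raises IndexError when out of range — those inputs are excluded by Pre_.
def pvIx (c : List Int) (i : Int) : Int := (PySem.List.pyGet? c i).getD 0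

def pvRotate (c : List Int) : List Int :=
  [pvIx c 6, pvIx c 3, pvIx c 0, pvIx c 7, pvIx c 4, pvIx c 1, pvIx c 8, pvIx c 5, pvIx c 2]

def pvReflect (c : List Int) : List Int :=
  [pvIx c 2, pvIx c 1, pvIx c 0, pvIx c 5, pvIx c 4, pvIx c 3, pvIx c 8, pvIx c 7, pvIx c 6]

def get_symmetries_py (b : List Int) : List (List Int) :=
  let st := (PySem.List.pyRange 0 4 1).foldl
    (fun (st : List (List Int) × List Int) _ =>
      (st.1 ++ [st.2, pvReflect st.2], pvRotate st.2))
    ([], b)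
  st.1

-- ===== PORT B =====
def pvPerms : List (List Int) :=
  [[2, 1, 0, 5, 4, 3, 8, 7, 6],
   [6, 3, 0, 7, 4, 1, 8, 5, 2],
   [0, 3, 6, 1, 4, 7, 2, 5, 8],
   [8, 7, 6, 5, 4, 3, 2, 1, 0],
   [6, 7, 8, 3, 4, 5, 0, 1, 2],
   [2, 5, 8, 1, 4, 7, 0, 3, 6],
   [8, 5, 2, 7, 4, 1, 6, 3, 0]]

def get_symmetries_py_alt (b : List Int) : List (List Int) :=
  [b] ++ pvPerms.map (fun p => p.map (fun i => (PySem.List.pyGet? b i).getD 0))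

-- ===== PRECONDITION & SPEC =====
-- Pre_ excludes boards with fewer than 9 cells, on which Python A raises IndexError (b[8]).
def Pre_get_symmetries_py (b : List Int) : Prop := 9 ≤ b.length
instance (b : List Int) : Decidable (Pre_get_symmetries_py b) := by unfold Pre_get_symmetries_py; infer_instance
def pvWitness_get_symmetries_py : List Int := [1, 0, -1, 0, 1, 0, -1, 0, 1]

def Spec_get_symmetries_py (b : List Int) (out : List (List Int)) : Prop := out = get_symmetries_py_alt b
instance (b : List Int) (out : List (List Int)) : Decidable (Spec_get_symmetries_py b out) := by unfold Spec_get_symmetries_py; infer_instance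

-- ===== CLAIM (what is proved, stated in full; the proofs are below) =====
def Claim_equal_get_symmetries_py : Prop := ∀ (b : List Int), Dom_get_symmetries_py b → Pre_get_symmetries_py b → Spec_get_symmetries_py b (get_symmetries_py b)

-- ===== LEMMAS AND PROOFS =====

-- ===== VERDICT (by name: the statement is the Claim_ definition above) =====
theorem get_symmetries_py_spec : Claim_equal_get_symmetries_py := by
  intro b _ hpre
  unfold Pre_get_symmetries_py at hpre
  match b, hpre with
  | x0 :: x1 :: x2 :: x3 :: x4 :: x5 :: x6 :: x7 :: x8 :: rest, _ =>
    simp [Spec_get_symmetries_py, get_symmetries_py, get_symmetries_py_alt,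
      pvPerms, pvRotate, pvReflect, pvIx, PySem.List.pyRange,
      PySem.List.pyGet?_of_nonneg, List.range_succ]
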